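-- pv_equiv track=rewrite | github.com/prachiraut711/RSL_Practice | que_47.py | max_duplicate_distance_bruteforce
-- ===== SOURCE A (Python) =====
-- def max_duplicate_distance_bruteforce(arr):
--     n = len(arr)
--     max_dist = -1
--     for i in range(n):
--         for j in range(i+1, n):
--             if arr[i] == arr[j]:
--                 dist = j - i
--                 if dist > max_dist:
--                     max_dist = dist
--     return max_dist
-- ===== SOURCE B (Python) =====
-- def max_duplicate_distance_bruteforce(arr):
--     first = {}
--     best = -1
--     for j, v in enumerate(arr):
--         if v in first:
--             d = j - first[v]
--             if d > best:
--                 best = d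
--         else:
--             first[v] = j
--     return best
-- ===== Notes on version B (the rewrite author's own statement) =====
-- stated objective: faster
-- what changed: Replaced the O(n^2) all-pairs scan by a single pass that records each value's first occurrence index in a dict and maximises j - first[v] at each later occurrence.
import Mathlib
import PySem

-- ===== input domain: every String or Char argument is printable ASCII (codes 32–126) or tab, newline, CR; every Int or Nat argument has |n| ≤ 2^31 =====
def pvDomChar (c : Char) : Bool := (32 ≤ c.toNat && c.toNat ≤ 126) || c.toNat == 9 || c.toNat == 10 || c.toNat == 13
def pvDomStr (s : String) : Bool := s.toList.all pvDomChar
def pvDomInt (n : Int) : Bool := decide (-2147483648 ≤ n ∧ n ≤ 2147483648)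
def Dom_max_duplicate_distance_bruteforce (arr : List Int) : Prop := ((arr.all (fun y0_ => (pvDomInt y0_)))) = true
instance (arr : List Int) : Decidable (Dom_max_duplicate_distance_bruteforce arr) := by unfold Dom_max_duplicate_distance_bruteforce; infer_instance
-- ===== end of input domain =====

-- B replaces A's all-pairs O(n^2) scan by a one-pass first-occurrence dict maximising j - first[v] (measurably faster).

-- ===== PORT A =====
def max_duplicate_distance_bruteforce (arr : List Int) : Int :=
  let n : Int := (arr.length : Int)
  (PySem.List.pyRange 0 n 1).foldl (fun max_dist i =>
    (PySem.List.pyRange (i + 1) n 1).foldl (fun max_dist j =>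
      -- arr[i], arr[j]: i, j always in range here, so pyGetD is exact
      if PySem.List.pyGetD arr i 0 = PySem.List.pyGetD arr j 0 then
        let dist := j - i
        if dist > max_dist then dist else max_dist
      else max_dist) max_dist) (-1)

-- ===== PORT B =====
def max_duplicate_distance_bruteforce_alt (arr : List Int) : Int :=
  ((PySem.List.enumerate arr 0).foldl (fun st jv =>
      match PySem.Dict.get? st.1 jv.2 with
      | some fi =>
        let d := jv.1 - fi
        (st.1, if d > st.2 then d else st.2)
      | none => (PySem.Dict.insert st.1 jv.2 jv.1, st.2))
    (PySem.Dict.empty, -1)).2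

-- ===== PRECONDITION & SPEC =====
def Spec_max_duplicate_distance_bruteforce (arr : List Int) (out : Int) : Prop := out = max_duplicate_distance_bruteforce_alt arr
instance (arr : List Int) (out : Int) : Decidable (Spec_max_duplicate_distance_bruteforce arr out) := by unfold Spec_max_duplicate_distance_bruteforce; infer_instance

-- ===== CLAIM (what is proved, stated in full; the proofs are below) =====
def Claim_equal_max_duplicate_distance_bruteforce : Prop := ∀ (arr : List Int), Dom_max_duplicate_distance_bruteforce arr → Spec_max_duplicate_distance_bruteforce arr (max_duplicate_distance_bruteforce arr)

-- ===== LEMMAS AND PROOFS =====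

-- candidate distances A's nested loops feed into its running max
def pairCands (arr : List Int) : List Int :=
  (PySem.List.pyRange 0 (arr.length : Int) 1).flatMap (fun i =>
    ((PySem.List.pyRange (i + 1) (arr.length : Int) 1).filter (fun j =>
        decide (PySem.List.pyGetD arr i 0 = PySem.List.pyGetD arr j 0))).map (fun j => j - i))

-- candidate distances B's single pass feeds into its running max
-- (`pre` = elements already processed, in order)
def firstCands : List Int → List Int → List Int
  | _, [] => []
  | pre, x :: suf =>
    (if x ∈ pre then [((pre.length : Int) - ((pre.idxOf x : Nat) : Int))] else [])
      ++ firstCands (pre ++ [x]) suf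

lemma ite_gt_max (m x : Int) : (if x > m then x else m) = max m x := by
  rw [max_def]; split <;> split <;> omega

lemma foldl_inner (arr : List Int) (i : Int) (l : List Int) (m : Int) :
    l.foldl (fun md j =>
        if PySem.List.pyGetD arr i 0 = PySem.List.pyGetD arr j 0 then
          (if j - i > md then j - i else md) else md) m
      = ((l.filter (fun j =>
            decide (PySem.List.pyGetD arr i 0 = PySem.List.pyGetD arr j 0))).map
          (fun j => j - i)).foldl max m := by
  induction l generalizing m with
  | nil => rfl
  | cons a t ih =>
    simp only [List.foldl_cons, List.filter_cons]
    by_cases h : PySem.List.pyGetD arr i 0 = PySem.List.pyGetD arr a 0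
    · rw [if_pos h, ite_gt_max, ih, if_pos (by simpa using h)]
      simp
    · rw [if_neg h, ih, if_neg (by simpa using h)]

lemma foldl_outer (l : List Int) (g : Int → List Int) (m : Int) :
    l.foldl (fun md i => (g i).foldl max md) m = (l.flatMap g).foldl max m := by
  induction l generalizing m with
  | nil => rfl
  | cons a t ih => simp [List.foldl_append, ih]

lemma A_eq_pairCands (arr : List Int) :
    max_duplicate_distance_bruteforce arr = (pairCands arr).foldl max (-1) := by
  simp only [max_duplicate_distance_bruteforce, pairCands]
  rw [← foldl_outer]
  exact List.foldl_ext _ _ _ (fun md i _ => foldl_inner arr i _ md)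

lemma mem_pairCands (arr : List Int) (x : Int) :
    x ∈ pairCands arr ↔ ∃ i j : Int, 0 ≤ i ∧ i < j ∧ j < (arr.length : Int) ∧
      PySem.List.pyGetD arr i 0 = PySem.List.pyGetD arr j 0 ∧ x = j - i := by
  simp only [pairCands, List.mem_flatMap, List.mem_map, List.mem_filter,
    PySem.List.mem_pyRange_one, decide_eq_true_eq]
  constructor
  · rintro ⟨i, ⟨h0, _⟩, j, ⟨⟨h1, h2⟩, hp⟩, hx⟩
    exact ⟨i, j, h0, by omega, h2, hp, hx.symm⟩
  · rintro ⟨i, j, h0, hij, hjn, hp, hx⟩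
    exact ⟨i, ⟨h0, by omega⟩, j, ⟨⟨by omega, hjn⟩, hp⟩, hx.symm⟩

lemma B_loop : ∀ (suf pre : List Int) (d : PySem.Dict Int Int) (best : Int),
    (∀ v : Int, PySem.Dict.get? d v =
        if v ∈ pre then some ((pre.idxOf v : Nat) : Int) else none) →
    ((PySem.List.enumerate suf ((pre.length : Nat) : Int)).foldl (fun st jv =>
        match PySem.Dict.get? st.1 jv.2 with
        | some fi => (st.1, if jv.1 - fi > st.2 then jv.1 - fi else st.2)
        | none => (PySem.Dict.insert st.1 jv.2 jv.1, st.2))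
      (d, best)).2 = (firstCands pre suf).foldl max best := by
  intro suf
  induction suf with
  | nil => intro pre d best _; simp [firstCands]
  | cons x t ih =>
    intro pre d best hd
    rw [PySem.List.enumerate_cons]
    simp only [List.foldl_cons]
    have hlen : (((pre ++ [x]).length : Nat) : Int) = ((pre.length : Nat) : Int) + 1 := by
      simp
    by_cases hx : x ∈ pre
    · have hg : PySem.Dict.get? d x = some ((pre.idxOf x : Nat) : Int) := by
        rw [hd x]; simp [hx]
      have hd' : ∀ v : Int, PySem.Dict.get? d v =
          if v ∈ pre ++ [x] then some (((pre ++ [x]).idxOf v : Nat) : Int) else none := by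
        intro v; rw [hd v]
        by_cases hv : v ∈ pre
        · simp [hv, List.idxOf_append_of_mem hv]
        · have hvx : v ≠ x := fun e => hv (e ▸ hx)
          simp [hv, hvx]
      simp only [hg]
      rw [show ((pre.length : Nat) : Int) + 1 = (((pre ++ [x]).length : Nat) : Int) from hlen.symm]
      rw [ih (pre ++ [x]) d _ hd']
      simp [firstCands, hx, ite_gt_max]
    · have hg : PySem.Dict.get? d x = none := by
        rw [hd x]; simp [hx]
      have hd' : ∀ v : Int, PySem.Dict.get? (PySem.Dict.insert d x ((pre.length : Nat) : Int)) v =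
          if v ∈ pre ++ [x] then some (((pre ++ [x]).idxOf v : Nat) : Int) else none := by
        intro v; rw [PySem.Dict.get?_insert]
        by_cases hvx : v = x
        · subst hvx
          rw [if_pos rfl, if_pos (by simp)]
          rw [List.idxOf_append_of_notMem hx]
          simp
        · rw [if_neg hvx, hd v]
          by_cases hv : v ∈ pre
          · simp [hv, List.idxOf_append_of_mem hv]
          · simp [hv, hvx]
      simp only [hg]
      rw [show ((pre.length : Nat) : Int) + 1 = (((pre ++ [x]).length : Nat) : Int) from hlen.symm]
      rw [ih (pre ++ [x]) _ _ hd']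
      simp [firstCands, hx]

lemma B_eq_firstCands (arr : List Int) :
    max_duplicate_distance_bruteforce_alt arr = (firstCands [] arr).foldl max (-1) := by
  have h := B_loop arr [] PySem.Dict.empty (-1) (by intro v; simp)
  simpa [max_duplicate_distance_bruteforce_alt] using h

lemma mem_firstCands : ∀ (suf pre : List Int) (x : Int),
    x ∈ firstCands pre suf ↔ ∃ k : Nat, k < suf.length ∧
      (suf.getD k 0) ∈ pre ++ suf.take k ∧
      x = ((pre.length + k : Nat) : Int) - (((pre ++ suf.take k).idxOf (suf.getD k 0) : Nat) : Int) := by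
  intro suf
  induction suf with
  | nil => intro pre x; simp [firstCands]
  | cons a t ih =>
    intro pre x
    simp only [firstCands, List.mem_append, List.mem_ite_nil_right, List.mem_singleton, ih]
    constructor
    · rintro (⟨ha, hx⟩ | ⟨k, hk, hmem, hx⟩)
      · refine ⟨0, by simp, by simpa using ha, by simpa using hx⟩
      · refine ⟨k + 1, by simpa using Nat.succ_lt_succ hk, ?_, ?_⟩
        · simpa [List.append_cons, or_assoc] using hmem
        · rw [show (a :: t).getD (k + 1) 0 = t.getD k 0 from rfl,
              show (a :: t).take (k + 1) = a :: t.take k from rfl,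
              show pre ++ a :: t.take k = (pre ++ [a]) ++ t.take k from List.append_cons pre a _]
          rw [hx]
          congr 1
          simp
          omega
    · rintro ⟨k, hk, hmem, hx⟩
      cases k with
      | zero =>
        left
        refine ⟨by simpa using hmem, by simpa using hx⟩
      | succ k =>
        right
        refine ⟨k, by simpa using hk, ?_, ?_⟩
        · simpa [List.append_cons, or_assoc] using hmem
        · rw [show (a :: t).getD (k + 1) 0 = t.getD k 0 from rfl,
              show (a :: t).take (k + 1) = a :: t.take k from rfl,
              show pre ++ a :: t.take k = (pre ++ [a]) ++ t.take k from List.append_cons pre a _] at hx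
          rw [hx]
          congr 1
          simp
          omega

lemma idxOf_min (l : List Int) (v : Int) (i : Nat) (hi : i < l.length) (h : l[i] = v) :
    l.idxOf v ≤ i := by
  induction l generalizing i with
  | nil => simp at hi
  | cons a t ih =>
    cases i with
    | zero => simp_all
    | succ j =>
      simp at hi h
      by_cases hav : a = v
      · have hb : (a == v) = true := by simp [hav]
        simp [List.idxOf_cons, hb]
      · have hb : (a == v) = false := by simp [hav]
        have := ih j hi h
        simp [List.idxOf_cons, hb]
        omega

lemma foldl_max_eq_of_dominate (l1 l2 : List Int) (c : Int)
    (h12 : ∀ x ∈ l1, ∃ y ∈ l2, x ≤ y) (h21 : ∀ y ∈ l2, ∃ x ∈ l1, y ≤ x) :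
    l1.foldl max c = l2.foldl max c := by
  apply le_antisymm
  · rcases PySem.List.foldl_max_mem l1 c with h | h
    · rw [h]; exact (PySem.List.le_foldl_max l2 c).1
    · obtain ⟨y, hy, hle⟩ := h12 _ h
      exact hle.trans ((PySem.List.le_foldl_max l2 c).2 y hy)
  · rcases PySem.List.foldl_max_mem l2 c with h | h
    · rw [h]; exact (PySem.List.le_foldl_max l1 c).1
    · obtain ⟨x, hx, hle⟩ := h21 _ h
      exact hle.trans ((PySem.List.le_foldl_max l1 c).2 x hx)

-- ===== VERDICT (by name: the statement is the Claim_ definition above) =====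
theorem max_duplicate_distance_bruteforce_spec : Claim_equal_max_duplicate_distance_bruteforce := by
  intro arr _
  unfold Spec_max_duplicate_distance_bruteforce
  rw [A_eq_pairCands, B_eq_firstCands]
  apply foldl_max_eq_of_dominate
  · -- every pair distance is dominated by a first-occurrence distance
    intro x hx
    obtain ⟨i, j, h0, hij, hjn, hp, hx⟩ := (mem_pairCands arr x).mp hx
    have h0j : 0 ≤ j := by omega
    set i0 := i.toNat with hi0
    set j0 := j.toNat with hj0
    have hi : i = (i0 : Int) := (Int.toNat_of_nonneg h0).symm
    have hj : j = (j0 : Int) := (Int.toNat_of_nonneg h0j).symm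
    have hij0 : i0 < j0 := by omega
    have hjlen : j0 < arr.length := by omega
    have hilen : i0 < arr.length := by omega
    have htlen : (arr.take j0).length = j0 := by simp; omega
    have hpi : arr.getD i0 0 = arr.getD j0 0 := by
      rw [hi, hj] at hp
      simpa using hp
    set v := arr.getD j0 0 with hv
    have hti : i0 < (arr.take j0).length := by omega
    have htv : (arr.take j0)[i0]'hti = v := by
      rw [List.getElem_take, ← List.getD_eq_getElem arr 0 hilen, hpi]
    have hmem : v ∈ arr.take j0 := htv ▸ List.getElem_mem hti
    refine ⟨((j0 : Nat) : Int) - (((arr.take j0).idxOf v : Nat) : Int), ?_, ?_⟩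
    · rw [mem_firstCands]
      exact ⟨j0, hjlen, by simpa using hmem, by rw [hv]; simp [List.getD]⟩
    · have hle : (arr.take j0).idxOf v ≤ i0 := idxOf_min _ v i0 hti htv
      omega
  · -- every first-occurrence distance is itself a pair distance
    intro y hy
    obtain ⟨k, hk, hmem, hy⟩ := (mem_firstCands arr [] y).mp hy
    simp only [List.nil_append, List.length_nil, Nat.zero_add] at hmem hy
    set v := arr.getD k 0 with hv
    set i0 := (arr.take k).idxOf v with hi0
    have hti : i0 < (arr.take k).length := List.idxOf_lt_length_of_mem hmem
    have htlen : (arr.take k).length = k := by simp; omega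
    have hik : i0 < k := by omega
    have hilen : i0 < arr.length := by omega
    have hgi : arr.getD i0 0 = v := by
      rw [List.getD_eq_getElem arr 0 hilen, ← List.getElem_take (h := hti)]
      exact List.getElem_idxOf hti
    refine ⟨y, ?_, le_refl y⟩
    rw [mem_pairCands]
    refine ⟨((i0 : Nat) : Int), ((k : Nat) : Int), by omega, by exact_mod_cast hik, by exact_mod_cast hk, ?_, by omega⟩
    have hik2 : arr.getD i0 0 = arr.getD k 0 := by rw [hgi, hv]
    simpa [List.getD] using hik2
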